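-- pv_equiv track=rewrite | github.com/LilPomidorLil/yandex_algorithm | Lecture/Linear Search/task_5.py | findminword
-- ===== SOURCE A (Python) =====
-- def findminword(seq):
--     if len(seq) == 0:
--         return ''
--
--     minlen = len(seq[0])
--
--     # первый проход - ищем минимальную длину символа
--     for i in range(len(seq)):
--         if len(seq[i]) < minlen:
--             minlen = len(seq[i])
--
--     ans = []
--
--     # второй проход - находим все объекты у которых длина равна минимально найденному значению
--     for word in seq:
--         if len(word) == minlen:
--             ans.append(word)
--
--     return ' '.join(ans)
-- ===== SOURCE B (Python) =====
-- def findminword(seq):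
--     best_len = None
--     ans = []
--     for word in seq:
--         L = len(word)
--         if not ans or L < best_len:
--             best_len = L
--             ans = [word]
--         elif L == best_len:
--             ans.append(word)
--     return ' '.join(ans)
-- ===== Notes on version B (the rewrite author's own statement) =====
-- stated objective: alternative
-- what changed: Replaces A's two sequential passes (first compute the minimum length, then filter the words of that length) by a single pass that maintains the best length and the answer list together, resetting the list whenever a strictly shorter word appears.
import Mathlib
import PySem

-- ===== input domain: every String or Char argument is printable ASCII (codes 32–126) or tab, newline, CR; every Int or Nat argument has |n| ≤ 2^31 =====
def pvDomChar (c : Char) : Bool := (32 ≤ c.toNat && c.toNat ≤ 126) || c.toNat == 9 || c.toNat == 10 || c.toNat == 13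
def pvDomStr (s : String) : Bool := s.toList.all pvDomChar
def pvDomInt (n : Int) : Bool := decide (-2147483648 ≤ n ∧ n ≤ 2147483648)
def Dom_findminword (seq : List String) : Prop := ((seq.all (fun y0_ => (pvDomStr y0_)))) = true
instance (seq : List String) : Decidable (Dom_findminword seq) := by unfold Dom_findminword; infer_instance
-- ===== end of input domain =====

-- B replaces A's two passes (min length, then filter) by one pass keeping the best length and answer list together; same return value, same cost.


-- ===== PORT A =====
def findminword (seq : List String) : String :=
  if seq.length = 0 then "" else
    let minlen := (PySem.List.pyRange 0 (PySem.List.len seq)).foldl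
      (fun m i =>
        if PySem.Str.len (PySem.List.pyGetD seq i "") < m
        then PySem.Str.len (PySem.List.pyGetD seq i "") else m)
      (PySem.Str.len (PySem.List.pyGetD seq 0 ""))
    let ans := seq.foldl
      (fun acc w => if PySem.Str.len w = minlen then acc ++ [w] else acc) []
    PySem.Str.join " " ans

-- ===== PORT B =====
def findminword_alt (seq : List String) : String :=
  let st := seq.foldl
    (fun (st : Int × List String) w =>
      let L := PySem.Str.len w
      if st.2.isEmpty || decide (L < st.1) then (L, [w])
      else if L = st.1 then (st.1, st.2 ++ [w]) else st)
    (0, [])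
  PySem.Str.join " " st.2

-- ===== PRECONDITION & SPEC =====
def Spec_findminword (seq : List String) (out : String) : Prop := out = findminword_alt seq
instance (seq : List String) (out : String) : Decidable (Spec_findminword seq out) := by unfold Spec_findminword; infer_instance

-- ===== CLAIM (what is proved, stated in full; the proofs are below) =====
def Claim_equal_findminword : Prop := ∀ (seq : List String), Dom_findminword seq → Spec_findminword seq (findminword seq)

-- ===== LEMMAS AND PROOFS =====

-- the running minimum of A's first pass, as a pure fold over the words
def pvMin (b : Int) (xs : List String) : Int :=
  xs.foldl (fun m w => if PySem.Str.len w < m then PySem.Str.len w else m) b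

lemma pvMin_cons (b : Int) (w : String) (xs : List String) :
    pvMin b (w :: xs) = pvMin (if PySem.Str.len w < b then PySem.Str.len w else b) xs := rfl

lemma pvMin_le (xs : List String) : ∀ b : Int, pvMin b xs ≤ b := by
  induction xs with
  | nil => intro b; simp [pvMin]
  | cons w xs ih =>
    intro b
    rw [pvMin_cons]
    split_ifs with h
    · exact le_trans (ih _) (le_of_lt h)
    · exact ih b

-- B's loop invariant: from a nonempty answer list, the fold computes the running
-- minimum together with the words of that minimal length, keeping the old list
-- exactly when the minimum does not improve.
lemma bfold_inv (xs : List String) : ∀ (b : Int) (ans : List String), ans ≠ [] →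
    xs.foldl
      (fun (st : Int × List String) w =>
        let L := PySem.Str.len w
        if st.2.isEmpty || decide (L < st.1) then (L, [w])
        else if L = st.1 then (st.1, st.2 ++ [w]) else st)
      (b, ans)
    = (pvMin b xs,
       (if pvMin b xs = b then ans else []) ++ xs.filter (fun w => PySem.Str.len w = pvMin b xs)) := by
  induction xs with
  | nil => intro b ans _; simp [pvMin]
  | cons w xs ih =>
    intro b ans hne
    have hansE : ans.isEmpty = false := by simpa [List.isEmpty_iff] using hne
    rw [List.foldl_cons, pvMin_cons]
    by_cases hlt : PySem.Str.len w < b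
    · -- strictly shorter: reset to (len w, [w])
      simp only [hansE, hlt, decide_true, Bool.or_true, if_true]
      rw [ih (PySem.Str.len w) [w] (by simp)]
      have hle : pvMin (PySem.Str.len w) xs ≤ PySem.Str.len w := pvMin_le xs _
      have hnb : pvMin (PySem.Str.len w) xs ≠ b := by omega
      rw [if_neg hnb]
      by_cases he : pvMin ((w.length : Int)) xs = ((w.length : Int))
      · simp [he]
      · simp [he, Ne.symm he]
    · -- not shorter: minimum unchanged on this step
      simp only [hansE, hlt, decide_false, Bool.or_false, Bool.false_eq_true, if_false]
      by_cases he : PySem.Str.len w = b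
      · -- equal: append w
        have he' : (w.length : Int) = b := by simpa using he
        rw [if_pos he, ih b (ans ++ [w]) (by simp)]
        by_cases hm : pvMin b xs = b
        · simp [hm, he', List.append_assoc]
        · have hne' : ¬ ((w.length : Int) = pvMin b xs) := by
            intro h; exact hm (by omega)
          simp [hm, hne']
      · -- longer: state unchanged
        rw [if_neg he, ih b ans hne]
        have hgt : b < PySem.Str.len w := lt_of_le_of_ne (not_lt.mp hlt) (Ne.symm he)
        have hlw : PySem.Str.len w = (w.length : Int) := by simp
        have hne' : ¬ ((w.length : Int) = pvMin b xs) := by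
          have := pvMin_le xs b; omega
        simp [hne']

-- ===== VERDICT (by name: the statement is the Claim_ definition above) =====
theorem findminword_spec : Claim_equal_findminword := by
  intro seq _
  unfold Spec_findminword findminword findminword_alt
  cases seq with
  | nil => rfl
  | cons a rest =>
    simp only [List.length_cons, Nat.succ_ne_zero, if_false]
    rw [PySem.List.foldl_pyRange_zero_pyGetD (a :: rest) ""
      (fun m w => if PySem.Str.len w < m then PySem.Str.len w else m)
      (PySem.Str.len (PySem.List.pyGetD (a :: rest) 0 ""))]
    have h0 : PySem.List.pyGetD (a :: rest) 0 "" = a := by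
      simp [PySem.List.pyGetD, PySem.List.pyGet?, PySem.List.pyIdx?]
    rw [h0]
    -- A's minimum: the first fold step leaves the seed unchanged
    have hminA : pvMin (PySem.Str.len a) (a :: rest) = pvMin (PySem.Str.len a) rest := by
      rw [pvMin_cons]; simp
    -- B's loop: the first step resets the empty list to (len a, [a]), then the invariant applies
    have hB : (List.foldl
        (fun (st : Int × List String) w =>
          let L := PySem.Str.len w
          if st.2.isEmpty || decide (L < st.1) then (L, [w])
          else if L = st.1 then (st.1, st.2 ++ [w]) else st)
        ((0 : Int), ([] : List String)) (a :: rest))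
      = (pvMin (PySem.Str.len a) rest,
         (if pvMin (PySem.Str.len a) rest = PySem.Str.len a then [a] else []) ++
           rest.filter (fun w => PySem.Str.len w = pvMin (PySem.Str.len a) rest)) := by
      rw [List.foldl_cons]
      exact bfold_inv rest (PySem.Str.len a) [a] (by simp)
    rw [hB]
    show PySem.Str.join " "
        ((a :: rest).foldl
          (fun acc w => if PySem.Str.len w = pvMin (PySem.Str.len a) (a :: rest) then acc ++ [w] else acc) [])
      = PySem.Str.join " "
        ((if pvMin (PySem.Str.len a) rest = PySem.Str.len a then [a] else []) ++
           rest.filter (fun w => PySem.Str.len w = pvMin (PySem.Str.len a) rest))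
    rw [hminA]
    have hA := PySem.List.foldl_append_if
      (fun w => decide (PySem.Str.len w = pvMin (PySem.Str.len a) rest)) (fun w => w)
      (a :: rest) []
    simp only [decide_eq_true_eq] at hA
    rw [hA]
    congr 1
    by_cases he : PySem.Str.len a = pvMin (PySem.Str.len a) rest
    · have he' : (a.length : Int) = pvMin ((a.length : Int)) rest := by simpa using he
      rw [if_pos he.symm]
      simp [← he']
    · have he' : ¬ ((a.length : Int) = pvMin ((a.length : Int)) rest) := by simpa using he
      rw [if_neg (fun h => he h.symm)]
      simp [he']
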